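-- pv_equiv track=rewrite | github.com/bipsec/Leet-Code | Codeforces/sum_of_round_numbers.py | make_round
-- ===== SOURCE A (Python) =====
-- def make_round(number):
--     if number < 10:
--         return [number]
--     else:
--         digits = list(str(number))
--         rounded_parts = []
--         for i, digit in enumerate(digits):
--             rounded_digit = int(digit) * 10 ** (len(digits) - 1 - i)
--             if rounded_digit != 0:
--                 rounded_parts.append(rounded_digit)
--         return rounded_parts
-- ===== SOURCE B (Python) =====
-- def make_round(number):
--     if number < 10:
--         return [number]
--     parts = []
--     n = number
--     place = 1
--     while n > 0:
--         d = n % 10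
--         if d:
--             parts.append(d * place)
--         place *= 10
--         n //= 10
--     parts.reverse()
--     return parts
-- ===== Notes on version B (the rewrite author's own statement) =====
-- stated objective: alternative
-- what changed: Replaced the str()/enumerate digit-string scan with pure arithmetic extraction: remainder modulo ten with a running power-of-ten multiplier, least-significant digit first, list reversed at the end; no string conversion and no per-digit exponentiation.
import Mathlib
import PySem

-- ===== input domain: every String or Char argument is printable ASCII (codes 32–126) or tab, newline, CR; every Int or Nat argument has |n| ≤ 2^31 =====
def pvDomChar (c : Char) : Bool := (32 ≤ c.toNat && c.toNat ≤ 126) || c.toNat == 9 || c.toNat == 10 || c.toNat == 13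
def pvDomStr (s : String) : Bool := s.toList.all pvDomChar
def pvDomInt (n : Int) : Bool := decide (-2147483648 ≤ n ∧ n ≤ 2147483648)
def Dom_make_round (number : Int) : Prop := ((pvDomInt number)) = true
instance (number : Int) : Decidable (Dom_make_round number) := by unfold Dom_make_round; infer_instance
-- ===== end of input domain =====

-- B replaces A's str()/enumerate digit-string scan by arithmetic digit extraction (n % 10 with a
-- running power of ten, reversed at the end): no string conversion and no per-digit exponentiation.

-- ===== PORT A =====
-- In the else branch number ≥ 10, so str(number) has only digit chars and int(digit) never raises:
-- it is ported as (ofChars? [c]).getD 0, exact on every reachable input.  The exponent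
-- len(digits)-1-i is always ≥ 0 there (i < len), so .toNat on it is exact too.
def make_round (number : Int) : List Int :=
  if number < 10 then [number]
  else
    let digits := PySem.Int.toChars number
    List.foldl
      (fun acc (p : Int × Char) =>
        let rd := (PySem.Int.ofChars? [p.2]).getD 0 * 10 ^ ((PySem.List.len digits - 1 - p.1).toNat)
        if rd ≠ 0 then acc ++ [rd] else acc)
      [] (PySem.List.enumerate digits 0)

-- ===== PORT B =====
-- the while-loop of Source B: n > 0 guard, d = n % 10, append d*place when nonzero, place *= 10, n //= 10
def altLoop (n place : Int) (parts : List Int) : List Int :=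
  if 0 < n then
    let d := PySem.Int.mod n 10
    altLoop (PySem.Int.floordiv n 10) (place * 10) (if d ≠ 0 then parts ++ [d * place] else parts)
  else parts
termination_by n.toNat
decreasing_by
  rw [PySem.Int.floordiv_eq_ediv_of_pos (by norm_num)]
  omega

def make_round_alt (number : Int) : List Int :=
  if number < 10 then [number]
  else (altLoop number 1 []).reverse

-- ===== PRECONDITION & SPEC =====
def Spec_make_round (number : Int) (out : List Int) : Prop := out = make_round_alt number
instance (number : Int) (out : List Int) : Decidable (Spec_make_round number out) := by unfold Spec_make_round; infer_instance

-- ===== CLAIM (what is proved, stated in full; the proofs are below) =====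
def Claim_equal_make_round : Prop := ∀ (number : Int), Dom_make_round number → Spec_make_round number (make_round number)

-- ===== LEMMAS AND PROOFS =====

-- common reference value both programs are reduced to:
-- the nonzero components of the base-10 digit list (least significant first)
def comps : List Nat → Int → List Int
  | [], _ => []
  | d :: ds, place => (if (d : Int) ≠ 0 then [(d : Int) * place] else []) ++ comps ds (place * 10)

theorem val_digitChar (d : Nat) (hd : d < 10) :
    (PySem.Int.ofChars? [Nat.digitChar d]).getD 0 = (d : Int) := by
  interval_cases d <;> decide

theorem toDigitsCore_eq (f : Nat) : ∀ (n : Nat) (acc : List Char), 0 < n → n < f →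
    Nat.toDigitsCore 10 f n acc = ((Nat.digits 10 n).map Nat.digitChar).reverse ++ acc := by
  induction f with
  | zero => intro n acc h hf; omega
  | succ f ih =>
    intro n acc h hf
    rw [Nat.toDigitsCore]
    show (if n / 10 = 0 then (n % 10).digitChar :: acc else Nat.toDigitsCore 10 f (n / 10) ((n % 10).digitChar :: acc)) = _
    by_cases h10 : n / 10 = 0
    · rw [if_pos h10]
      rw [Nat.digits_def' (by norm_num) h, h10, Nat.digits_zero]
      simp
    · rw [if_neg h10]
      rw [ih (n / 10) _ (by omega) (by omega)]
      rw [Nat.digits_def' (by norm_num) h]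
      simp

theorem toChars_eq (n : Int) (h : 10 ≤ n) :
    PySem.Int.toChars n = ((Nat.digits 10 n.toNat).map Nat.digitChar).reverse := by
  rw [PySem.Int.toChars, if_neg (by omega), Nat.toDigits,
      toDigitsCore_eq _ _ _ (by omega) (by omega)]
  simp

theorem enumerate_append_singleton {α : Type} (xs : List α) (y : α) : ∀ (s : Int),
    PySem.List.enumerate (xs ++ [y]) s
      = PySem.List.enumerate xs s ++ [((s + xs.length : Int), y)] := by
  induction xs with
  | nil => intro s; simp [PySem.List.enumerate]
  | cons x xs ih =>
    intro s
    rw [List.cons_append, PySem.List.enumerate_cons, PySem.List.enumerate_cons, ih]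
    simp; ring_nf

theorem altLoop_eq (m : Nat) : ∀ (place : Int) (parts : List Int),
    altLoop (m : Int) place parts = parts ++ comps (Nat.digits 10 m) place := by
  induction m using Nat.strong_induction_on with
  | _ m ih =>
    intro place parts
    rw [altLoop]
    by_cases h : 0 < m
    · rw [if_pos (by exact_mod_cast h)]
      have h1 : PySem.Int.mod (↑m) 10 = ((m % 10 : Nat) : Int) := by
        rw [PySem.Int.mod_eq_emod_of_pos (by norm_num)]; omega
      have h2 : PySem.Int.floordiv (↑m) 10 = ((m / 10 : Nat) : Int) := by
        rw [PySem.Int.floordiv_eq_ediv_of_pos (by norm_num)]; omega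
      rw [h1, h2]
      rw [ih (m / 10) (by omega)]
      rw [Nat.digits_def' (by norm_num) h]
      simp only [comps]
      by_cases hd : ((m % 10 : Nat) : Int) ≠ 0
      · rw [if_pos hd, if_pos hd]; simp
      · rw [if_neg hd, if_neg hd]; simp
    · rw [if_neg (by exact_mod_cast h)]
      have : m = 0 := by omega
      subst this
      simp [comps]

theorem aside (ds : List Nat) : ∀ (k : Nat) (init : List Int), (∀ d ∈ ds, d < 10) →
    List.foldl
      (fun acc (p : Int × Char) =>
        let rd := (PySem.Int.ofChars? [p.2]).getD 0 * 10 ^ (((ds.length : Int) - 1 - p.1).toNat + k)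
        if rd ≠ 0 then acc ++ [rd] else acc)
      init (PySem.List.enumerate ((ds.map Nat.digitChar).reverse) 0)
      = init ++ (comps ds (10 ^ k)).reverse := by
  induction ds with
  | nil => intro k init _; simp [comps]
  | cons d ds ih =>
    intro k init hlt
    have hrev : ((d :: ds).map Nat.digitChar).reverse
        = (ds.map Nat.digitChar).reverse ++ [Nat.digitChar d] := by simp
    rw [hrev, enumerate_append_singleton, List.foldl_append]
    -- prefix: same steps as the list one shorter, with the power offset moved into k
    have hcongr : List.foldl
        (fun acc (p : Int × Char) =>
          let rd := (PySem.Int.ofChars? [p.2]).getD 0 * 10 ^ ((((d :: ds).length : Int) - 1 - p.1).toNat + k)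
          if rd ≠ 0 then acc ++ [rd] else acc)
        init (PySem.List.enumerate ((ds.map Nat.digitChar).reverse) 0)
      = List.foldl
        (fun acc (p : Int × Char) =>
          let rd := (PySem.Int.ofChars? [p.2]).getD 0 * 10 ^ (((ds.length : Int) - 1 - p.1).toNat + (k + 1))
          if rd ≠ 0 then acc ++ [rd] else acc)
        init (PySem.List.enumerate ((ds.map Nat.digitChar).reverse) 0) := by
      apply PySem.List.foldl_congr_mem
      intro acc p hp
      rw [PySem.List.mem_enumerate_iff] at hp
      obtain ⟨j, hj, rfl⟩ := hp
      simp only [List.length_reverse, List.length_map] at hj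
      have he : ((((d :: ds).length : Int) - 1 - (0 + (j : Int))).toNat + k)
          = (((ds.length : Int) - 1 - (0 + (j : Int))).toNat + (k + 1)) := by
        simp only [List.length_cons]
        omega
      simp only [he]
    rw [hcongr, ih (k + 1) init (fun d hd => hlt d (List.mem_cons_of_mem _ hd))]
    -- last element: the leading digit d at index ds.length, power 10^k
    have hval : (PySem.Int.ofChars? [Nat.digitChar d]).getD 0 = (d : Int) :=
      val_digitChar d (hlt d List.mem_cons_self)
    have hlen : (((ds.map Nat.digitChar).reverse).length : Int) = (ds.length : Int) := by simp
    simp only [List.foldl_cons, List.foldl_nil, hlen]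
    have he2 : ((((d :: ds).length : Int) - 1 - (0 + (ds.length : Int))).toNat + k) = k := by
      simp only [List.length_cons]; omega
    simp only [he2, hval]
    rw [comps]
    by_cases hd : (d : Int) ≠ 0
    · rw [if_pos (by positivity), if_pos hd]
      have : (10 : Int) ^ k * 10 = 10 ^ (k + 1) := by ring
      simp [this]
    · rw [if_neg (by simp at hd ⊢; simp [hd]), if_neg hd]
      have : (10 : Int) ^ k * 10 = 10 ^ (k + 1) := by ring
      simp [this]

-- ===== VERDICT (by name: the statement is the Claim_ definition above) =====
theorem make_round_spec : Claim_equal_make_round := by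
  intro number _
  unfold Spec_make_round make_round make_round_alt
  by_cases h : number < 10
  · simp [h]
  · rw [if_neg h, if_neg h]
    have h10 : (10 : Int) ≤ number := by omega
    have hB : altLoop number 1 [] = comps (Nat.digits 10 number.toNat) 1 := by
      have := altLoop_eq number.toNat 1 []
      rw [Int.toNat_of_nonneg (by omega)] at this
      simpa using this
    have hlt : ∀ d ∈ Nat.digits 10 number.toNat, d < 10 := fun d hd =>
      Nat.digits_lt_base (by norm_num) hd
    have hA := aside (Nat.digits 10 number.toNat) 0 [] hlt
    simp only [Nat.add_zero, pow_zero, List.nil_append] at hA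
    simp only [toChars_eq number h10, PySem.List.len_eq, List.length_reverse,
      List.length_map]
    rw [hA, hB]
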